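-- pv_equiv track=rewrite | github.com/buthaya/DeepInsuranceDocs | deepinsurancedocs/data_preparation/data_utils.py | label_dict_to_bieso
-- ===== SOURCE A (Python) =====
-- def label_dict_to_bieso(label_dict):
--     """
--     Converts a dictionary of labels to a dictionary of BIESO tags.
--
--     Args:
--         label_dict (dict): A dictionary of labels.
--
--     Returns:
--         dict: A dictionary of BIESO tags.
--     """
--     new_label_dict = {0: "O"}
--     i = 1
--     for label in label_dict.values():
--         if label != 'O':
--             new_label_dict[i] = f"B-{label}"  # beginning of entity
--             new_label_dict[i+1] = f"I-{label}"  # inside entity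
--             new_label_dict[i+2] = f"E-{label}"  # end of entity
--             new_label_dict[i+3] = f"S-{label}"  # single entity
--             i += 4
--     return new_label_dict
-- ===== SOURCE B (Python) =====
-- def label_dict_to_bieso(label_dict):
--     """
--     Converts a dictionary of labels to a dictionary of BIESO tags.
--     Computes each tag directly from its index: key 0 is 'O'; for key k >= 1,
--     the prefix is determined by (k-1) % 4 and the label by (k-1) // 4.
--     """
--     non_o = [lab for lab in label_dict.values() if lab != 'O']
--     prefixes = ['B', 'I', 'E', 'S']
--     return {k: 'O' if k == 0 else f'{prefixes[(k - 1) % 4]}-{non_o[(k - 1) // 4]}'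
--             for k in range(4 * len(non_o) + 1)}
-- ===== Notes on version B (the rewrite author's own statement) =====
-- stated objective: alternative
-- what changed: B replaces A's sequential loop with a running counter and four keyed insertions by a closed-form index-to-tag mapping: it filters the non-'O' labels once, then a dict comprehension over range(4*len+1) computes each tag from its key via (k-1)%4 (prefix) and (k-1)//4 (label).
import Mathlib
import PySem

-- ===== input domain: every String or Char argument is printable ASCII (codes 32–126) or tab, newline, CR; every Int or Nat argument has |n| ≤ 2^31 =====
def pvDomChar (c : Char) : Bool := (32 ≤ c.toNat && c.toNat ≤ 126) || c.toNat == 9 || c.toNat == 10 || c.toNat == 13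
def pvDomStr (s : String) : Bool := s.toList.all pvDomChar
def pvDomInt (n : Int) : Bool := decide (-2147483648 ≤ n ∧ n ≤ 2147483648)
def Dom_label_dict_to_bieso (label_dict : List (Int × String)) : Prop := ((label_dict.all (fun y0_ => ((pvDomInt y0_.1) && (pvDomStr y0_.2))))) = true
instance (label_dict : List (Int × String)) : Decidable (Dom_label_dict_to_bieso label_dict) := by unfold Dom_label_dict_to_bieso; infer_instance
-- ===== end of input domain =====

-- B replaces A's running counter and sequential keyed insertions by a closed-form
-- index-to-tag mapping over range(4*len(non_o)+1) (objective: alternative).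

-- ===== PORT A =====
def label_dict_to_bieso (label_dict : List (Int × String)) : List (Int × String) :=
  -- new_label_dict = {0: "O"}; i = 1; for label in label_dict.values(): ...
  ((PySem.Dict.ofList label_dict).values.foldl
    (fun (st : PySem.Dict Int String × Int) label =>
      if label ≠ "O" then
        (((((st.1.insert st.2 ("B-" ++ label)).insert (st.2 + 1) ("I-" ++ label)).insert
            (st.2 + 2) ("E-" ++ label)).insert (st.2 + 3) ("S-" ++ label)), st.2 + 4)
      else st)
    ((PySem.Dict.empty).insert 0 "O", 1)).1.items

-- ===== PORT B =====
-- non_o = [lab for lab in label_dict.values() if lab != 'O']; prefixes = ['B','I','E','S']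
-- {k: 'O' if k == 0 else f'{prefixes[(k-1)%4]}-{non_o[(k-1)//4]}' for k in range(4*len(non_o)+1)}
-- (the `.getD ""` discharges the Option of Python's raising indexing; for k in this range
--  both indices are always in bounds, so the default is never taken)
def label_dict_to_bieso_alt (label_dict : List (Int × String)) : List (Int × String) :=
  let nonO := (PySem.Dict.ofList label_dict).values.filter (fun lab => lab != "O")
  let prefixes : List String := ["B", "I", "E", "S"]
  (PySem.Dict.ofList ((PySem.List.pyRange 0 (4 * (nonO.length : Int) + 1) 1).map
    (fun k => (k, if k = 0 then "O" else
      ((PySem.List.pyGet? prefixes (PySem.Int.mod (k - 1) 4)).getD "") ++ "-" ++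
      ((PySem.List.pyGet? nonO (PySem.Int.floordiv (k - 1) 4)).getD ""))))).items

-- ===== PRECONDITION & SPEC =====
def Spec_label_dict_to_bieso (label_dict : List (Int × String)) (out : List (Int × String)) : Prop := out = label_dict_to_bieso_alt label_dict
instance (label_dict : List (Int × String)) (out : List (Int × String)) : Decidable (Spec_label_dict_to_bieso label_dict out) := by unfold Spec_label_dict_to_bieso; infer_instance

-- ===== CLAIM (what is proved, stated in full; the proofs are below) =====
def Claim_equal_label_dict_to_bieso : Prop := ∀ (label_dict : List (Int × String)), Dom_label_dict_to_bieso label_dict → Spec_label_dict_to_bieso label_dict (label_dict_to_bieso label_dict)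

-- ===== LEMMAS AND PROOFS =====

-- the four tags contributed by one non-'O' label
def pvQuad (v : String) : List String := ["B-" ++ v, "I-" ++ v, "E-" ++ v, "S-" ++ v]

-- enumerate over an append splits at the length offset
theorem pv_enumerate_append {α : Type} (xs ys : List α) (s : Int) :
    PySem.List.enumerate (xs ++ ys) s
      = PySem.List.enumerate xs s ++ PySem.List.enumerate ys (s + xs.length) := by
  induction xs generalizing s with
  | nil => simp [PySem.List.enumerate_nil]
  | cons x xs ih =>
    simp [PySem.List.enumerate_cons, ih]
    ring_nf

-- inserting at the next index appends one numbered entry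
theorem pv_insert_fresh_enum (ts : List String) (v : String) :
    (PySem.Dict.mk (PySem.List.enumerate ts 0)).insert (ts.length : Int) v
      = PySem.Dict.mk (PySem.List.enumerate (ts ++ [v]) 0) := by
  apply PySem.Dict.ext
  have hc : (PySem.Dict.mk (PySem.List.enumerate ts 0)).contains (ts.length : Int) = false := by
    rw [PySem.Dict.contains_eq_decide_mem_keys]
    simp only [PySem.Dict.keys, decide_eq_false_iff_not]
    intro hmem
    have : ((ts.length : Int)) ∈ (PySem.List.enumerate ts 0).map (·.1) := hmem
    rw [PySem.List.map_fst_enumerate] at this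
    have := (PySem.List.mem_pyRange_one).1 this
    omega
  rw [PySem.Dict.items_insert_of_not_contains _ _ hc]
  rw [pv_enumerate_append]
  simp [PySem.List.enumerate_cons, PySem.List.enumerate_nil]

-- the loop invariant: A's (dict, counter) state is the enumerated accumulated tag list
theorem pv_inv (vals : List String) : ∀ (ts : List String),
    (vals.foldl
      (fun (st : PySem.Dict Int String × Int) label =>
        if label ≠ "O" then
          (((((st.1.insert st.2 ("B-" ++ label)).insert (st.2 + 1) ("I-" ++ label)).insert
              (st.2 + 2) ("E-" ++ label)).insert (st.2 + 3) ("S-" ++ label)), st.2 + 4)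
        else st)
      (PySem.Dict.mk (PySem.List.enumerate ts 0), (ts.length : Int)))
    = (PySem.Dict.mk (PySem.List.enumerate
        (vals.foldl (fun acc label => if label ≠ "O" then acc ++ pvQuad label else acc) ts) 0),
       ((vals.foldl (fun acc label => if label ≠ "O" then acc ++ pvQuad label else acc) ts).length : Int)) := by
  induction vals with
  | nil => intro ts; simp
  | cons v vals ih =>
    intro ts
    by_cases hv : v = "O"
    · simp only [List.foldl_cons, hv, ne_eq, not_true_eq_false, if_false]
      simpa using ih ts
    · simp only [List.foldl_cons, ne_eq, hv, not_false_eq_true, if_true]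
      rw [pv_insert_fresh_enum ts ("B-" ++ v)]
      rw [show ((ts.length : Int) + 1) = (((ts ++ ["B-" ++ v]).length : Int)) by simp]
      rw [pv_insert_fresh_enum]
      rw [show ((ts.length : Int) + 2) = (((ts ++ ["B-" ++ v] ++ ["I-" ++ v]).length : Int)) by simp]
      rw [pv_insert_fresh_enum]
      rw [show ((ts.length : Int) + 3) = (((ts ++ ["B-" ++ v] ++ ["I-" ++ v] ++ ["E-" ++ v]).length : Int)) by simp]
      rw [pv_insert_fresh_enum]
      rw [show ((ts.length : Int) + 4) = (((ts ++ ["B-" ++ v] ++ ["I-" ++ v] ++ ["E-" ++ v] ++ ["S-" ++ v]).length : Int)) by simp]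
      simpa [pvQuad, List.append_assoc] using ih (ts ++ pvQuad v)

-- the accumulated tag list is "O" followed by the quads of the non-'O' labels
theorem pv_tags (vals : List String) (acc : List String) :
    vals.foldl (fun acc label => if label ≠ "O" then acc ++ pvQuad label else acc) acc
      = acc ++ (vals.filter (fun lab => lab != "O")).flatMap pvQuad := by
  induction vals generalizing acc with
  | nil => simp
  | cons v vals ih =>
    rw [List.foldl_cons]
    by_cases hv : v = "O"
    · rw [if_neg (not_not_intro hv), ih]
      simp [hv]
    · rw [if_pos hv, ih]
      simp [hv, List.append_assoc]

-- a dict built from pairs with distinct keys keeps exactly those pairs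
theorem pv_ofList_nodup (l : List (Int × String)) (h : (l.map (·.1)).Nodup) :
    (PySem.Dict.ofList l).items = l := by
  show (l.foldl (fun d p => d.insert p.1 p.2) PySem.Dict.empty).items = _
  rw [PySem.Dict.items_foldl_insert_fresh _ _ _ _ (by simp [PySem.Dict.empty]) h]
  simp [PySem.Dict.empty]

-- indexing into the flatMap of quads: block (n / 4), position (n % 4)
theorem pv_flat_idx (ls : List String) (n : Nat) (h : n < 4 * ls.length) :
    (ls.flatMap pvQuad)[n]? =
      some (((["B", "I", "E", "S"] : List String)[n % 4]?.getD "") ++ "-" ++ (ls[n / 4]?.getD "")) := by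
  induction ls generalizing n with
  | nil => simp at h
  | cons v ls ih =>
    rw [List.flatMap_cons]
    by_cases h4 : n < 4
    · interval_cases n <;> simp [pvQuad]
    · have hlen : (pvQuad v).length = 4 := by simp [pvQuad]
      have hn : n = 4 + (n - 4) := by omega
      rw [List.getElem?_append_right (by omega)]
      rw [hlen]
      have hrec := ih (n - 4) (by simp at h ⊢; omega)
      rw [hrec]
      have h1 : (n - 4) % 4 = n % 4 := by omega
      have h2 : n / 4 = (n - 4) / 4 + 1 := by omega
      rw [h1, h2]
      simp

-- the closed-form tag at index j equals the j-th accumulated tag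
theorem pv_formula (nonO : List String) (j : Int)
    (h0 : 0 ≤ j) (h1 : j < 4 * (nonO.length : Int) + 1) :
    (if j = 0 then "O" else
      ((PySem.List.pyGet? (["B", "I", "E", "S"] : List String) (PySem.Int.mod (j - 1) 4)).getD "") ++ "-" ++
      ((PySem.List.pyGet? nonO (PySem.Int.floordiv (j - 1) 4)).getD ""))
    = PySem.List.pyGetD ("O" :: nonO.flatMap pvQuad) j "" := by
  obtain ⟨n, rfl⟩ := Int.eq_ofNat_of_zero_le h0
  match n with
  | 0 => simp [PySem.List.pyGetD]
  | Nat.succ n =>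
    have hn : n < 4 * nonO.length := by exact_mod_cast (by push_cast at h1 ⊢; omega : (n : Int) < 4 * (nonO.length : Int))
    have hj0 : ((n + 1 : Nat) : Int) ≠ 0 := by omega
    rw [if_neg hj0]
    have hsub : ((n + 1 : Nat) : Int) - 1 = (n : Nat) := by push_cast; ring
    rw [hsub]
    rw [show ((4 : Int)) = ((4 : Nat) : Int) by norm_num]
    rw [PySem.Int.mod_natCast, PySem.Int.floordiv_natCast]
    rw [PySem.List.pyGet?_natCast, PySem.List.pyGet?_natCast]
    rw [PySem.List.pyGetD_natCast, List.getD_cons_succ, List.getD_eq_getElem?_getD,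
      pv_flat_idx nonO n hn]
    simp

-- ===== VERDICT (by name: the statement is the Claim_ definition above) =====
theorem label_dict_to_bieso_spec : Claim_equal_label_dict_to_bieso := by
  intro ld _
  unfold Spec_label_dict_to_bieso label_dict_to_bieso label_dict_to_bieso_alt
  have h0 : ((PySem.Dict.empty : PySem.Dict Int String).insert 0 "O", (1 : Int))
      = (PySem.Dict.mk (PySem.List.enumerate ["O"] 0), ((["O"].length : Nat) : Int)) := by decide
  rw [h0, pv_inv]
  set vals := (PySem.Dict.ofList ld).values with hvals
  set nonO := vals.filter (fun lab => lab != "O") with hnonO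
  have htags : vals.foldl (fun acc label => if label ≠ "O" then acc ++ pvQuad label else acc) ["O"]
      = "O" :: nonO.flatMap pvQuad := by
    rw [pv_tags]; rfl
  rw [htags]
  have hflatlen : (nonO.flatMap pvQuad).length = 4 * nonO.length := by
    induction nonO with
    | nil => simp
    | cons v ls ih => simp [pvQuad] at ih ⊢; omega
  -- B side: the dict comprehension keeps exactly its pairs (keys are the range, distinct)
  rw [pv_ofList_nodup _ (by
    rw [List.map_map]
    have hmap : ((fun p : Int × String => p.1) ∘ (fun k => ((k : Int), if k = 0 then "O" else
        ((PySem.List.pyGet? (["B", "I", "E", "S"] : List String) (PySem.Int.mod (k - 1) 4)).getD "") ++ "-" ++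
        ((PySem.List.pyGet? nonO (PySem.Int.floordiv (k - 1) 4)).getD "")))) = id := by
      funext k; rfl
    rw [hmap, List.map_id]
    exact PySem.List.nodup_pyRange_one _ _)]
  -- both sides are the same map over the same range
  have hlen : (("O" :: nonO.flatMap pvQuad).length : Int) = 4 * (nonO.length : Int) + 1 := by
    simp [hflatlen]
  rw [PySem.List.enumerate_eq_map_pyRange (d := "")]
  rw [show PySem.List.len ("O" :: nonO.flatMap pvQuad) = 4 * (nonO.length : Int) + 1 from by
    simpa [PySem.List.len_eq] using hlen]
  apply List.map_congr_left
  intro j hj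
  have hmem := (PySem.List.mem_pyRange_one).1 hj
  have := pv_formula nonO j hmem.1 (by omega)
  simp only [this]
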